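-- pv_equiv track=rewrite | github.com/Liekkas-03/2026tjjm | data/scripts/12_stage5_heterogeneity_and_paper_ready_v1.py | subgroup_vars
-- ===== SOURCE A (Python) =====
-- BASE_CORE_VARS = [
--     "age",
--     "age_squared",
--     "female",
--     "married",
--     "urban",
--     "edu_1",
--     "edu_2",
--     "edu_3",
--     "edu_4",
--     "year_2020",
--     "poor_health",
--     "chronic_count",
--     "adl_limit",
--     "iadl_limit",
--     "depression_high",
--     "total_cognition_w",
--     "family_care_index_v1",
--     "co_reside_child",
--     "care_elder_or_disabled",
--     "economic_pressure_index_v1",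
--     "log_hhcperc_v1_w",
--     "log_medical_expense_w",
--     "medical_burden_w",
-- ]
--
-- def subgroup_vars(group_name: str) -> list[str]:
--     vars_use = BASE_CORE_VARS.copy()
--     if group_name.startswith("gender_"):
--         vars_use = [v for v in vars_use if v != "female"]
--     if group_name.startswith("urban_"):
--         vars_use = [v for v in vars_use if v != "urban"]
--     if group_name.startswith("health_"):
--         vars_use = [v for v in vars_use if v != "poor_health"]
--     if group_name.startswith("familyhigh_"):
--         vars_use = [v for v in vars_use if v != "family_care_index_v1"]
--     if group_name.startswith("econhigh_"):
--         vars_use = [v for v in vars_use if v != "economic_pressure_index_v1"]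
--     return vars_use
-- ===== SOURCE B (Python) =====
-- BASE_CORE_VARS = [
--     "age",
--     "age_squared",
--     "female",
--     "married",
--     "urban",
--     "edu_1",
--     "edu_2",
--     "edu_3",
--     "edu_4",
--     "year_2020",
--     "poor_health",
--     "chronic_count",
--     "adl_limit",
--     "iadl_limit",
--     "depression_high",
--     "total_cognition_w",
--     "family_care_index_v1",
--     "co_reside_child",
--     "care_elder_or_disabled",
--     "economic_pressure_index_v1",
--     "log_hhcperc_v1_w",
--     "log_medical_expense_w",
--     "medical_burden_w",
-- ]
--
-- _PREFIX_DROPS = {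
--     "gender_": "female",
--     "urban_": "urban",
--     "health_": "poor_health",
--     "familyhigh_": "family_care_index_v1",
--     "econhigh_": "economic_pressure_index_v1",
-- }
--
-- def subgroup_vars(group_name: str) -> list[str]:
--     # The five group prefixes each consist of a single '_'-free segment followed by
--     # '_', so group_name starts with one of them iff its first '_'-delimited segment
--     # (with the separator) equals that key; at most one key can match.
--     head, sep, _rest = group_name.partition("_")
--     drop = _PREFIX_DROPS.get(head + sep)
--     return [v for v in BASE_CORE_VARS if v != drop]
-- ===== Notes on version B (the rewrite author's own statement) =====
-- stated objective: simpler
-- what changed: Replaced five sequential startswith-guarded conditional list-rebuild passes with str.partition: extract the first '_'-delimited segment, one dict lookup keyed by it to find the (at most one) dropped variable, and a single filtering pass over BASE_CORE_VARS.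
import Mathlib
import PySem

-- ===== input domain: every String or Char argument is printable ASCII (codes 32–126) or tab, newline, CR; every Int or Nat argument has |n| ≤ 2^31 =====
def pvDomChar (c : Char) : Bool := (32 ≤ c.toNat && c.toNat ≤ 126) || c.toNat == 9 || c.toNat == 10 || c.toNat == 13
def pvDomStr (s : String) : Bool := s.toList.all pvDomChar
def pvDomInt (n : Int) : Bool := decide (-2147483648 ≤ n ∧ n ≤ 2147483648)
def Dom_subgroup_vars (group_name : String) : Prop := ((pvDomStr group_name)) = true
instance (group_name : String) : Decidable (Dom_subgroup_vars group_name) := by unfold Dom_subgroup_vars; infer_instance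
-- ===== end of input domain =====

-- B replaces A's five startswith-guarded conditional rebuild passes by str.partition:
-- it extracts the first '_'-delimited segment (with its separator), does one dict
-- lookup keyed by it, and filters once against the at-most-one dropped variable
-- (objective: simpler; correct because each group prefix is a single '_'-free
-- segment followed by '_', so matching it is exactly matching the partition key).

def baseCoreVars : List String := [
  "age", "age_squared", "female", "married", "urban",
  "edu_1", "edu_2", "edu_3", "edu_4", "year_2020",
  "poor_health", "chronic_count", "adl_limit", "iadl_limit", "depression_high",
  "total_cognition_w", "family_care_index_v1", "co_reside_child",
  "care_elder_or_disabled", "economic_pressure_index_v1",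
  "log_hhcperc_v1_w", "log_medical_expense_w", "medical_burden_w"]

-- ===== PORT A =====
def subgroup_vars (group_name : String) : List String :=
  let vars_use := baseCoreVars
  let vars_use := if PySem.Str.startswith group_name "gender_" then
      vars_use.filter (fun v => v != "female") else vars_use
  let vars_use := if PySem.Str.startswith group_name "urban_" then
      vars_use.filter (fun v => v != "urban") else vars_use
  let vars_use := if PySem.Str.startswith group_name "health_" then
      vars_use.filter (fun v => v != "poor_health") else vars_use
  let vars_use := if PySem.Str.startswith group_name "familyhigh_" then
      vars_use.filter (fun v => v != "family_care_index_v1") else vars_use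
  let vars_use := if PySem.Str.startswith group_name "econhigh_" then
      vars_use.filter (fun v => v != "economic_pressure_index_v1") else vars_use
  vars_use

-- ===== PORT B =====
def prefixDrops : PySem.Dict String String := PySem.Dict.ofList [
  ("gender_", "female"),
  ("urban_", "urban"),
  ("health_", "poor_health"),
  ("familyhigh_", "family_care_index_v1"),
  ("econhigh_", "economic_pressure_index_v1")]

-- head + sep of Python's group_name.partition("_"), ported by hand at the char level
-- (exact): head = the chars before the first '_', sep = "_" if '_' occurs else "".
def partitionKey (g : String) : String :=
  String.ofList (g.toList.takeWhile (fun c => c ≠ '_')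
    ++ (if g.toList.any (fun c => c == '_') then ['_'] else []))

def subgroup_vars_alt (group_name : String) : List String :=
  let drop : Option String := PySem.Dict.get? prefixDrops (partitionKey group_name)
  baseCoreVars.filter (fun v => !(some v == drop))

-- ===== PRECONDITION & SPEC =====
def Spec_subgroup_vars (group_name : String) (out : List String) : Prop := out = subgroup_vars_alt group_name
instance (group_name : String) (out : List String) : Decidable (Spec_subgroup_vars group_name out) := by unfold Spec_subgroup_vars; infer_instance

-- ===== CLAIM (what is proved, stated in full; the proofs are below) =====
def Claim_equal_subgroup_vars : Prop := ∀ (group_name : String), Dom_subgroup_vars group_name → Spec_subgroup_vars group_name (subgroup_vars group_name)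

-- ===== LEMMAS AND PROOFS =====

-- core: for an '_'-free segment s, the partition key (as chars) equals s ++ ['_']
-- iff s ++ ['_'] is a prefix of the string
theorem keyChars_eq_iff (s : List Char) (hs : ('_' : Char) ∉ s) (l : List Char) :
    (l.takeWhile (fun c => c ≠ '_') ++ (if l.any (fun c => c == '_') then ['_'] else [])
      = s ++ ['_']) ↔ (s ++ ['_']) <+: l := by
  induction l generalizing s with
  | nil => simp
  | cons c l ih =>
      by_cases hc : c = '_'
      · subst hc
        cases s with
        | nil => simp [List.cons_prefix_cons]
        | cons a s' =>
            have ha : a ≠ '_' := fun h => hs (by simp [h])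
            simp only [List.takeWhile_cons, List.any_cons, beq_self_eq_true, Bool.true_or,
              if_true, decide_eq_true_eq]
            constructor
            · intro h; exact absurd (List.cons.injEq .. ▸ h) (by simp [Ne.symm ha])
            · intro h; rw [List.cons_append, List.cons_prefix_cons] at h; exact absurd h.1 ha
      · have htake : (c :: l).takeWhile (fun c : Char => c ≠ '_') = c :: l.takeWhile (fun c => c ≠ '_') := by
          simp [hc]
        have hany : (c :: l).any (fun c => c == '_') = l.any (fun c => c == '_') := by
          simp [hc]
        rw [htake, hany]
        cases s with
        | nil =>
            simp only [List.nil_append, List.cons_prefix_cons]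
            constructor
            · intro h; exact absurd (List.cons.injEq .. ▸ h).1 hc
            · intro h; exact absurd h.1.symm hc
        | cons a s' =>
            have hs' : ('_' : Char) ∉ s' := fun h => hs (by simp [h])
            constructor
            · intro h
              injection h with h1 h2
              rw [List.cons_append, List.cons_prefix_cons]
              exact ⟨h1.symm, (ih s' hs').1 h2⟩
            · intro h
              rw [List.cons_append, List.cons_prefix_cons] at h
              obtain ⟨rfl, h2⟩ := h
              exact congrArg (a :: ·) ((ih s' hs').2 h2)

theorem key_eq_iff_startswith (g : String) (p : String)
    (hp : ∃ s, p.toList = s ++ ['_'] ∧ ('_' : Char) ∉ s) :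
    (partitionKey g = p) ↔ PySem.Str.startswith g p = true := by
  obtain ⟨s, hsp, hs⟩ := hp
  rw [PySem.Str.startswith_eq, PySem.Chars.startswith_iff, hsp,
      ← keyChars_eq_iff s hs g.toList]
  unfold partitionKey
  constructor
  · intro h
    have := congrArg String.toList h
    simpa [hsp] using this
  · intro h
    apply String.ext
    simpa [hsp] using h

theorem get?_prefixDrops (k : String) :
    PySem.Dict.get? prefixDrops k =
      if k = "gender_" then some "female"
      else if k = "urban_" then some "urban"
      else if k = "health_" then some "poor_health"
      else if k = "familyhigh_" then some "family_care_index_v1"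
      else if k = "econhigh_" then some "economic_pressure_index_v1"
      else none := by
  have h : prefixDrops = PySem.Dict.mk [
    ("gender_", "female"), ("urban_", "urban"), ("health_", "poor_health"),
    ("familyhigh_", "family_care_index_v1"),
    ("econhigh_", "economic_pressure_index_v1")] := by decide
  rw [h, PySem.Dict.get?_mk_cons, PySem.Dict.get?_mk_cons, PySem.Dict.get?_mk_cons,
      PySem.Dict.get?_mk_cons, PySem.Dict.get?_mk_cons]
  simp only [beq_iff_eq, eq_comm (b := k)]
  rfl

-- ===== VERDICT (by name: the statement is the Claim_ definition above) =====
theorem subgroup_vars_spec : Claim_equal_subgroup_vars := by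
  intro g _
  unfold Spec_subgroup_vars subgroup_vars subgroup_vars_alt
  have hg : ∀ p : String, (∃ s, p.toList = s ++ ['_'] ∧ ('_' : Char) ∉ s) →
      (PySem.Str.startswith g p = (partitionKey g == p)) := by
    intro p hp
    rcases h : partitionKey g == p with _ | _
    · rw [beq_eq_false_iff_ne] at h
      cases hsw : PySem.Str.startswith g p
      · rfl
      · exact absurd ((key_eq_iff_startswith g p hp).2 hsw) h
    · rw [beq_iff_eq] at h
      exact ((key_eq_iff_startswith g p hp).1 h)
  rw [hg "gender_" ⟨"gender".toList, by decide, by decide⟩,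
      hg "urban_" ⟨"urban".toList, by decide, by decide⟩,
      hg "health_" ⟨"health".toList, by decide, by decide⟩,
      hg "familyhigh_" ⟨"familyhigh".toList, by decide, by decide⟩,
      hg "econhigh_" ⟨"econhigh".toList, by decide, by decide⟩,
      get?_prefixDrops]
  by_cases h1 : partitionKey g = "gender_" <;>
  by_cases h2 : partitionKey g = "urban_" <;>
  by_cases h3 : partitionKey g = "health_" <;>
  by_cases h4 : partitionKey g = "familyhigh_" <;>
  by_cases h5 : partitionKey g = "econhigh_" <;>
    simp_all [baseCoreVars]
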